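-- pv_equiv track=rewrite | github.com/targed/test-projects | lexer/lexer.py | is_scientific
-- ===== SOURCE A (Python) =====
-- def is_digit(char):
--     return '0' <= char <= '9'
--
-- def is_decimal(s):
--     if not s:
--         return False
--
--     pos = 0
--
--     # State 0: Check for optional sign
--     if s[pos] in '+-':
--         pos += 1
--
--     # Must have at least one digit for integer part
--     if pos >= len(s):
--         return False
--
--     start_integer = pos
--
--     # State 1: Accept one or more digits (integer part)
--     while pos < len(s) and is_digit(s[pos]):
--         pos += 1
--
--     # Must have at least one digit in integer part
--     if pos == start_integer:
--         return False
--
--     # State 2: Must have a period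
--     if pos >= len(s) or s[pos] != '.':
--         return False
--     pos += 1
--
--     # Must have at least one digit for fractional part
--     if pos >= len(s):
--         return False
--
--     start_fraction = pos
--
--     # State 3: Accept one or more digits (fractional part)
--     while pos < len(s) and is_digit(s[pos]):
--         pos += 1
--
--     # Must have at least one digit in fractional part
--     if pos == start_fraction:
--         return False
--
--     return pos == len(s)
--
-- def is_scientific(s):
--     if not s or 'E' not in s:
--         return False
--
--     # Split on 'E' - must have exactly one 'E'
--     parts = s.split('E')
--     if len(parts) != 2:
--         return False
--
--     decimal_part, exponent_part = parts
--
--     # Validate decimal part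
--     if not is_decimal(decimal_part):
--         return False
--
--     # Validate exponent part (must be non-zero integer)
--     if not exponent_part:
--         return False
--
--     pos = 0
--
--     # Check for optional sign in exponent
--     if exponent_part[pos] in '+-':
--         pos += 1
--
--     # Must have at least one digit after optional sign
--     if pos >= len(exponent_part):
--         return False
--
--     start_exp_digits = pos
--     is_all_zeros = True
--
--     # Accept one or more digits and check if all are zeros
--     while pos < len(exponent_part):
--         if not is_digit(exponent_part[pos]):
--             return False
--         if exponent_part[pos] != '0':
--             is_all_zeros = False
--         pos += 1
--
--     # Must have at least one digit and not all zeros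
--     if pos == start_exp_digits or is_all_zeros:
--         return False
--
--     return True
-- ===== SOURCE B (Python) =====
-- def is_scientific(s):
--     parts = s.split('E')
--     if len(parts) != 2:
--         return False
--     mant, exp = parts
--     if mant[:1] in ('+', '-'):
--         mant = mant[1:]
--     dot_parts = mant.split('.')
--     if len(dot_parts) != 2:
--         return False
--     ip, fp = dot_parts
--     if not (ip and fp and all('0' <= c <= '9' for c in ip) and all('0' <= c <= '9' for c in fp)):
--         return False
--     if exp[:1] in ('+', '-'):
--         exp = exp[1:]
--     return bool(exp) and all('0' <= c <= '9' for c in exp) and any(c != '0' for c in exp)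
-- ===== Notes on version B (the rewrite author's own statement) =====
-- stated objective: simpler
-- what changed: A's index-based multi-state character scanner (explicit pos cursor, digit while-loops, running is_all_zeros flag) is replaced by splitting on 'E' and then on '.', with declarative all-digits / any-nonzero checks on the resulting pieces.
import Mathlib
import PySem

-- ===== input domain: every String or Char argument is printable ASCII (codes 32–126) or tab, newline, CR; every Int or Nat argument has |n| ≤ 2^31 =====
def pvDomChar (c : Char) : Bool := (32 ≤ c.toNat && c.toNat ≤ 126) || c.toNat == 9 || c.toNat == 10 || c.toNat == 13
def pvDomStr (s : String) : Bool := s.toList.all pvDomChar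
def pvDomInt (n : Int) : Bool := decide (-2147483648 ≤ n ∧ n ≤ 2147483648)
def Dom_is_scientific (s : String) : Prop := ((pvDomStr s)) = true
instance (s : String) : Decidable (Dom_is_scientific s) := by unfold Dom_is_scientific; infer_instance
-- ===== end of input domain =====

-- B replaces A's index-based multi-state character scanner by two splits ('E', then '.')
-- plus declarative all/any digit checks; objective: simpler (same cost, no speed claim).

-- shared hand port of Python's str.split(sep) for a one-character separator
-- (exact: ''.split(sep) = [''], adjacent separators give empty pieces, never returns [])
def pvSplitOn (sep : Char) : List Char → List (List Char)
  | [] => [[]]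
  | c :: r =>
    if c = sep then [] :: pvSplitOn sep r
    else
      match pvSplitOn sep r with
      | h :: t => (c :: h) :: t
      | [] => [[c]]

-- '0' <= char <= '9'  (Python's is_digit, used by both A and B)
def pvIsDigit (c : Char) : Bool := decide ('0' ≤ c) && decide (c ≤ '9')

-- ===== PORT A =====

-- A's `while pos < len(s) and is_digit(s[pos]): pos += 1`: (digits consumed, rest)
def pvSkipDigits : List Char → Nat × List Char
  | [] => (0, [])
  | c :: r =>
    if pvIsDigit c then
      let p := pvSkipDigits r
      (p.1 + 1, p.2)
    else (0, c :: r)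

def pvIsDecimal (l : List Char) : Bool :=
  match l with
  | [] => false                                     -- if not s
  | c :: rest =>
    let l1 := if c = '+' || c = '-' then rest else c :: rest   -- optional sign
    match l1 with
    | [] => false                                   -- pos >= len(s)
    | _ =>
      let p := pvSkipDigits l1                      -- integer-part digit loop
      if p.1 = 0 then false                         -- pos == start_integer
      else match p.2 with
        | '.' :: r2 =>                              -- must have a period
          (match r2 with
           | [] => false                            -- pos >= len(s)
           | _ =>
             let q := pvSkipDigits r2               -- fraction-part digit loop
             if q.1 = 0 then false                  -- pos == start_fraction
             else decide (q.2 = []))                -- pos == len(s)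
        | _ => false

-- A's exponent digit loop carrying is_all_zeros; the final `or is_all_zeros` folded in
def pvExpScan : List Char → Bool → Bool
  | [], allz => !allz
  | c :: r, allz => if !pvIsDigit c then false else pvExpScan r (allz && c == '0')

def is_scientific (s : String) : Bool :=
  let l := s.toList
  if l.isEmpty || !l.contains 'E' then false        -- if not s or 'E' not in s
  else
    match pvSplitOn 'E' l with                      -- s.split('E')
    | [dec, ex] =>
      if !pvIsDecimal dec then false
      else match ex with
        | [] => false                               -- if not exponent_part
        | c :: rest =>
          let e := if c = '+' || c = '-' then rest else c :: rest   -- optional sign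
          match e with
          | [] => false                             -- pos >= len(exponent_part)
          | _ => pvExpScan e true
    | _ => false                                    -- len(parts) != 2

-- ===== PORT B =====

def pvAllDigits (l : List Char) : Bool := l.all pvIsDigit

-- B's `if x[:1] in ('+','-'): x = x[1:]`
def pvStripSign (l : List Char) : List Char :=
  match l with
  | [] => []
  | c :: r => if c = '+' || c = '-' then r else c :: r

def is_scientific_alt (s : String) : Bool :=
  match pvSplitOn 'E' s.toList with
  | [mant, ex] =>
    (match pvSplitOn '.' (pvStripSign mant) with
     | [ip, fp] =>
       !ip.isEmpty && !fp.isEmpty && pvAllDigits ip && pvAllDigits fp &&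
         (let e := pvStripSign ex
          !e.isEmpty && pvAllDigits e && e.any (fun c => !(c == '0')))
     | _ => false)
  | _ => false

-- ===== PRECONDITION & SPEC =====
def Spec_is_scientific (s : String) (out : Bool) : Prop := out = is_scientific_alt s
instance (s : String) (out : Bool) : Decidable (Spec_is_scientific s out) := by unfold Spec_is_scientific; infer_instance

-- ===== CLAIM (what is proved, stated in full; the proofs are below) =====
def Claim_equal_is_scientific : Prop := ∀ (s : String), Dom_is_scientific s → Spec_is_scientific s (is_scientific s)

-- ===== LEMMAS AND PROOFS =====

theorem pvSplitOn_ne_nil (sep : Char) (l : List Char) : pvSplitOn sep l ≠ [] := by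
  induction l with
  | nil => simp [pvSplitOn]
  | cons c r ih =>
    simp only [pvSplitOn]
    split
    · simp
    · split <;> simp

theorem pvSplitOn_no_sep (sep : Char) (l : List Char) (h : sep ∉ l) : pvSplitOn sep l = [l] := by
  induction l with
  | nil => rfl
  | cons c r ih =>
    simp only [List.mem_cons, not_or] at h
    simp only [pvSplitOn]
    rw [if_neg (fun hc => h.1 hc.symm), ih h.2]

theorem pvSplitOn_eq_single (sep : Char) (l b : List Char) (h : pvSplitOn sep l = [b]) :
    l = b ∧ sep ∉ b := by
  induction l generalizing b with
  | nil =>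
    simp [pvSplitOn] at h
    subst h; simp
  | cons c r ih =>
    simp only [pvSplitOn] at h
    by_cases hc : c = sep
    · rw [if_pos hc] at h
      obtain ⟨h1, h2⟩ := List.cons_eq_cons.mp h
      exact absurd h2 (pvSplitOn_ne_nil sep r)
    · rw [if_neg hc] at h
      rcases hs : pvSplitOn sep r with _ | ⟨hd, tl⟩
      · exact absurd hs (pvSplitOn_ne_nil sep r)
      · rw [hs] at h
        obtain ⟨h1, h2⟩ := List.cons_eq_cons.mp h
        have h3 : tl = [] := by
          cases tl with
          | nil => rfl
          | cons x xs => simp at h2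
        subst h3
        obtain ⟨hr, hb⟩ := ih hd (by rw [hs])
        subst h1 hr
        constructor
        · rfl
        · simp only [List.mem_cons, not_or]
          exact ⟨fun hh => hc hh.symm, hb⟩

theorem pvSplitOn_eq_pair (sep : Char) (l a b : List Char) (h : pvSplitOn sep l = [a, b]) :
    l = a ++ sep :: b ∧ sep ∉ a ∧ sep ∉ b := by
  induction l generalizing a with
  | nil => simp [pvSplitOn] at h
  | cons c r ih =>
    simp only [pvSplitOn] at h
    by_cases hc : c = sep
    · rw [if_pos hc] at h
      obtain ⟨h1, h2⟩ := List.cons_eq_cons.mp h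
      obtain ⟨hr, hb⟩ := pvSplitOn_eq_single sep r b h2
      subst h1 hr hc
      simp [hb]
    · rw [if_neg hc] at h
      rcases hs : pvSplitOn sep r with _ | ⟨hd, tl⟩
      · exact absurd hs (pvSplitOn_ne_nil sep r)
      · rw [hs] at h
        obtain ⟨h1, h2⟩ := List.cons_eq_cons.mp h
        have : pvSplitOn sep r = [hd, b] := by rw [hs, h2]
        obtain ⟨hr, ha, hb⟩ := ih hd this
        subst h1 hr
        refine ⟨rfl, ?_, hb⟩
        simp only [List.mem_cons, not_or]
        exact ⟨fun hh => hc hh.symm, ha⟩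

theorem pvSplitOn_append (sep : Char) (a b : List Char) (ha : sep ∉ a) :
    pvSplitOn sep (a ++ sep :: b) = a :: pvSplitOn sep b := by
  induction a with
  | nil => simp [pvSplitOn]
  | cons c a' ih =>
    simp only [List.mem_cons, not_or] at ha
    simp only [List.cons_append, pvSplitOn]
    rw [if_neg (fun hc => ha.1 hc.symm), ih ha.2]

theorem pvSplitOn_pair (sep : Char) (a b : List Char) (ha : sep ∉ a) (hb : sep ∉ b) :
    pvSplitOn sep (a ++ sep :: b) = [a, b] := by
  rw [pvSplitOn_append sep a b ha, pvSplitOn_no_sep sep b hb]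

theorem pvSkipDigits_eq (l : List Char) :
    pvSkipDigits l = ((l.takeWhile pvIsDigit).length, l.dropWhile pvIsDigit) := by
  induction l with
  | nil => rfl
  | cons c r ih =>
    simp only [pvSkipDigits, List.takeWhile, List.dropWhile]
    by_cases hc : pvIsDigit c
    · simp [hc, ih]
    · simp [hc]

theorem pvExpScan_eq (l : List Char) (allz : Bool) :
    pvExpScan l allz = (pvAllDigits l && (!allz || l.any (fun c => !(c == '0')))) := by
  induction l generalizing allz with
  | nil => cases allz <;> rfl
  | cons c r ih =>
    simp only [pvExpScan, pvAllDigits, List.all_cons, List.any_cons]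
    by_cases hc : pvIsDigit c
    · simp only [hc, Bool.not_true, Bool.false_eq_true, if_false, Bool.true_and]
      rw [ih]
      simp only [pvAllDigits]
      cases allz <;> cases hz : (c == '0') <;> simp
    · simp [hc]

theorem takeWhile_all_append (p : Char → Bool) (a b : List Char) (h : a.all p = true) :
    (a ++ b).takeWhile p = a ++ b.takeWhile p ∧ (a ++ b).dropWhile p = b.dropWhile p := by
  induction a with
  | nil => simp
  | cons c a' ih =>
    simp only [List.all_cons, Bool.and_eq_true] at h
    simp only [List.cons_append, List.takeWhile_cons, List.dropWhile_cons, h.1, if_true]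
    obtain ⟨h1, h2⟩ := ih h.2
    simp [h1, h2]

theorem all_take_drop (a : List Char) (h : a.all pvIsDigit = true) :
    a.takeWhile pvIsDigit = a ∧ a.dropWhile pvIsDigit = [] := by
  simpa using takeWhile_all_append pvIsDigit a [] h

theorem not_mem_dot (l : List Char) (h : pvAllDigits l = true) : '.' ∉ l := by
  intro hm
  have := List.all_eq_true.mp h _ hm
  exact absurd this (by decide)

-- the mantissa core: A's digits-dot-digits scan equals B's split-on-dot test
theorem dotcore (l : List Char) :
    (if (pvSkipDigits l).1 = 0 then false
     else match (pvSkipDigits l).2 with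
       | '.' :: r2 =>
         (match r2 with
          | [] => false
          | _ =>
            if (pvSkipDigits r2).1 = 0 then false
            else decide ((pvSkipDigits r2).2 = []))
       | _ => false)
    = (match pvSplitOn '.' l with
       | [ip, fp] => !ip.isEmpty && !fp.isEmpty && pvAllDigits ip && pvAllDigits fp
       | _ => false) := by
  rw [Bool.eq_iff_iff]
  constructor
  · intro h
    simp only [pvSkipDigits_eq] at h
    by_cases h0 : (List.takeWhile pvIsDigit l).length = 0
    · rw [if_pos h0] at h; cases h
    · rw [if_neg h0] at h
      split at h
      · rename_i r2 heq
        split at h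
        · cases h
        · by_cases h2 : (List.takeWhile pvIsDigit r2).length = 0
          · rw [if_pos h2] at h; cases h
          · rw [if_neg h2] at h
            have hdrop2 : List.dropWhile pvIsDigit r2 = [] := by simpa using h
            have hall2 : pvAllDigits r2 = true := by
              have hsplit := List.takeWhile_append_dropWhile (l := r2) (p := pvIsDigit)
              rw [hdrop2, List.append_nil] at hsplit
              rw [pvAllDigits, ← hsplit]
              exact List.all_eq_true.mpr (fun a ha => List.mem_takeWhile_imp ha)
            have hall1 : pvAllDigits (l.takeWhile pvIsDigit) = true := by
              rw [pvAllDigits]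
              exact List.all_eq_true.mpr (fun a ha => List.mem_takeWhile_imp ha)
            have hl : l = l.takeWhile pvIsDigit ++ '.' :: r2 := by
              conv_lhs => rw [← List.takeWhile_append_dropWhile (l := l) (p := pvIsDigit)]
              rw [heq]
            rw [hl, pvSplitOn_pair '.' _ r2 (not_mem_dot _ hall1) (not_mem_dot _ hall2)]
            have htne : l.takeWhile pvIsDigit ≠ [] := by
              intro hh; rw [hh] at h0; exact h0 rfl
            have hr2ne : r2 ≠ [] := by
              intro hh; rw [hh] at h2; exact h2 rfl
            simp [htne, hr2ne, hall1, hall2]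
      · cases h
  · intro h
    rcases hs : pvSplitOn '.' l with _ | ⟨ip, t⟩ <;> rw [hs] at h
    · simp at h
    · rcases t with _ | ⟨fp, t2⟩
      · simp at h
      · rcases t2 with _ | _
        · rcases fp with _ | ⟨f, fs⟩
          · simp at h
          · simp only [Bool.and_eq_true] at h
            obtain ⟨⟨⟨h1, h2⟩, h3⟩, h4⟩ := h
            have hip : ip ≠ [] := by simpa using h1
            obtain ⟨hl, -, -⟩ := pvSplitOn_eq_pair '.' l ip (f :: fs) hs
            obtain ⟨ht, hdrop⟩ := takeWhile_all_append pvIsDigit ip ('.' :: f :: fs) h3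
            have htdot : List.takeWhile pvIsDigit ('.' :: f :: fs) = [] := by
              rw [List.takeWhile_cons]
              simp [show pvIsDigit '.' = false from rfl]
            have hddot : List.dropWhile pvIsDigit ('.' :: f :: fs) = '.' :: f :: fs := by
              rw [List.dropWhile_cons]
              simp [show pvIsDigit '.' = false from rfl]
            rw [htdot, List.append_nil] at ht
            rw [hddot] at hdrop
            obtain ⟨hfptake, hfpdrop⟩ := all_take_drop (f :: fs) h4
            simp only [pvSkipDigits_eq]
            rw [hl, ht, hdrop]
            rw [if_neg (by simpa [List.length_eq_zero_iff] using hip)]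
            show (if (List.takeWhile pvIsDigit (f :: fs)).length = 0 then false
                  else decide (List.dropWhile pvIsDigit (f :: fs) = [])) = true
            rw [if_neg (by rw [hfptake]; simp), hfpdrop]
            simp
        · simp at h

theorem decimal_eq (m : List Char) :
    pvIsDecimal m = (match pvSplitOn '.' (pvStripSign m) with
       | [ip, fp] => !ip.isEmpty && !fp.isEmpty && pvAllDigits ip && pvAllDigits fp
       | _ => false) := by
  rcases m with _ | ⟨c, rest⟩
  · rfl
  · rw [pvIsDecimal, pvStripSign]
    by_cases hsign : (c = '+' || c = '-') = true
    · rw [if_pos hsign]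
      rcases rest with _ | ⟨x, xs⟩
      · rfl
      · exact dotcore (x :: xs)
    · rw [if_neg hsign]
      exact dotcore (c :: rest)

-- A's exponent digit scan over the sign-stripped tail equals B's declarative test
theorem exp_core (e : List Char) :
    (match e with | [] => false | _ => pvExpScan e true)
    = (!e.isEmpty && pvAllDigits e && e.any (fun c => !(c == '0'))) := by
  rcases e with _ | ⟨c, r⟩
  · rfl
  · rw [pvExpScan_eq]
    simp

theorem exp_eq (ex : List Char) :
    (match ex with
     | [] => false
     | c :: rest =>
       let e := if c = '+' || c = '-' then rest else c :: rest
       match e with | [] => false | _ => pvExpScan e true)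
    = (let e := pvStripSign ex
       !e.isEmpty && pvAllDigits e && e.any (fun c => !(c == '0'))) := by
  rcases ex with _ | ⟨c, rest⟩
  · rfl
  · show (match (if c = '+' || c = '-' then rest else c :: rest) with
          | [] => false
          | _ => pvExpScan (if c = '+' || c = '-' then rest else c :: rest) true) = _
    rw [pvStripSign]
    by_cases hsign : (c = '+' || c = '-') = true
    · rw [if_pos hsign]; exact exp_core rest
    · rw [if_neg hsign]; exact exp_core (c :: rest)

theorem main_eq (s : String) : is_scientific s = is_scientific_alt s := by
  rw [is_scientific, is_scientific_alt]
  rcases hp : pvSplitOn 'E' s.toList with _ | ⟨d, t⟩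
  · exact absurd hp (pvSplitOn_ne_nil _ _)
  · rcases t with _ | ⟨e, t2⟩
    · split <;> rfl
    · rcases t2 with _ | ⟨x, t3⟩
      · obtain ⟨hl, -, -⟩ := pvSplitOn_eq_pair 'E' s.toList d e hp
        have hcon : s.toList.contains 'E' = true := by rw [hl]; simp
        have hemp : s.toList.isEmpty = false := by rw [hl]; simp
        simp only [hcon, hemp, Bool.not_true, Bool.or_false, Bool.false_eq_true, if_false]
        rw [decimal_eq d]
        rcases hq : pvSplitOn '.' (pvStripSign d) with _ | ⟨ip, u⟩
        · exact absurd hq (pvSplitOn_ne_nil _ _)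
        · rcases u with _ | ⟨fp, u2⟩
          · simp
          · rcases u2 with _ | _
            · by_cases hc : (!ip.isEmpty && !fp.isEmpty && pvAllDigits ip && pvAllDigits fp) = true
              · simp only [hc, Bool.not_true, Bool.false_eq_true, if_false, Bool.true_and]
                exact exp_eq e
              · rw [Bool.not_eq_true] at hc
                simp [hc]
            · simp
      · split <;> rfl

-- ===== VERDICT (by name: the statement is the Claim_ definition above) =====
theorem is_scientific_spec : Claim_equal_is_scientific := by
  intro s _
  show is_scientific s = is_scientific_alt s
  exact main_eq s
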